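-- pv_equiv track=rewrite | github.com/BioKT/MasterMSM | mastermsm/trajectory/traj_lib.py | _filter_states
-- ===== SOURCE A (Python) =====
-- def _filter_states(states):
--     """
--     Filters to remove not-assigned frames when using dbscan or hdbscan
--
--     """
--     fs = []
--     for s in states:
--         if s >= 0:
--                 fs.append(s)
--         else:
--             try:
--                 fs.append(fs[-1])
--             except IndexError:
--                 pass
--     return fs
-- ===== SOURCE B (Python) =====
-- def _filter_states(states):
--     """Run-length expansion: collect the indices of kept (non-negative) frames,
--     then emit each kept value repeated until the next kept index (or the end)."""
--     keep = [i for i, s in enumerate(states) if s >= 0]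
--     out = []
--     for j, i in enumerate(keep):
--         nxt = keep[j + 1] if j + 1 < len(keep) else len(states)
--         out += [states[i]] * (nxt - i)
--     return out
-- ===== Notes on version B (the rewrite author's own statement) =====
-- stated objective: alternative
-- what changed: Replaces the forward-fill loop (append fs[-1] on negatives under try/except) by a two-stage run-length expansion: first collect the indices of non-negative frames, then emit each kept value repeated up to the next kept index.
import Mathlib
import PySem

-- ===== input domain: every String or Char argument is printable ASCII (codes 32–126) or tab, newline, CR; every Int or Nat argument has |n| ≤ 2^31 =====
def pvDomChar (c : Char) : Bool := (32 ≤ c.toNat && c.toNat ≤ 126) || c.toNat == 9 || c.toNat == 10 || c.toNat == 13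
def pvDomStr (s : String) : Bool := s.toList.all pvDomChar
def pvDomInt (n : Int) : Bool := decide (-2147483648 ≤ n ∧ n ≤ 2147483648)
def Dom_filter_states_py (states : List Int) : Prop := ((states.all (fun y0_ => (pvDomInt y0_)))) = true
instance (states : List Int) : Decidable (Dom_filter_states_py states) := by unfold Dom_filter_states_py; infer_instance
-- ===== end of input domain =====

-- B replaces A's forward-fill loop by a two-stage run-length expansion over the
-- indices of kept (non-negative) frames. Alternative decomposition, same cost.

-- ===== PORT A =====
-- fs[-1] on empty fs raises IndexError, caught by 'pass': modelled by the none branch.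
def filter_states_py (states : List Int) : List Int :=
  states.foldl (fun fs s =>
    if s ≥ 0 then fs ++ [s]
    else match fs.getLast? with
      | some l => fs ++ [l]
      | none => fs) []

-- ===== PORT B =====
-- [i for i, s in enumerate(states) if s >= 0], transliterated with a running index.
def pvKeep (i : Nat) (xs : List Int) : List Nat :=
  match xs with
  | [] => []
  | s :: rest => if s ≥ 0 then i :: pvKeep (i + 1) rest else pvKeep (i + 1) rest

-- the 'for j, i in enumerate(keep)' loop with its keep[j+1]-or-len lookahead,
-- as structural recursion on the keep list.
def pvExpand (states : List Int) (keep : List Nat) : List Int :=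
  match keep with
  | [] => []
  | i :: rest =>
    let nxt := match rest with | [] => states.length | j :: _ => j
    List.replicate (nxt - i) (states.getD i 0) ++ pvExpand states rest

def filter_states_py_alt (states : List Int) : List Int :=
  pvExpand states (pvKeep 0 states)

-- ===== PRECONDITION & SPEC =====
def Spec_filter_states_py (states : List Int) (out : List Int) : Prop := out = filter_states_py_alt states
instance (states : List Int) (out : List Int) : Decidable (Spec_filter_states_py states out) := by unfold Spec_filter_states_py; infer_instance

-- ===== CLAIM (what is proved, stated in full; the proofs are below) =====
def Claim_equal_filter_states_py : Prop := ∀ (states : List Int), Dom_filter_states_py states → Spec_filter_states_py states (filter_states_py states)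

-- ===== LEMMAS AND PROOFS =====

-- Common characterisation both ports are reduced to: drop the leading negative
-- run, then forward-fill by accumulation.
def pvAccum (acc : Int) (xs : List Int) : List Int :=
  match xs with
  | [] => []
  | y :: ys => let v := if y ≥ 0 then y else acc; v :: pvAccum v ys

def pvDW (states : List Int) : List Int :=
  match states.dropWhile (fun s => decide (s < 0)) with
  | [] => []
  | x :: xs => x :: pvAccum x xs

-- A's fold, once the accumulator is nonempty with last element a, appends pvAccum a.
theorem pv_fold_accum (xs : List Int) (fs : List Int) (a : Int) :
    xs.foldl (fun (fs : List Int) (s : Int) =>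
      if s ≥ 0 then fs ++ [s]
      else match fs.getLast? with
        | some l => fs ++ [l]
        | none => fs) (fs ++ [a]) = fs ++ [a] ++ pvAccum a xs := by
  induction xs generalizing fs a with
  | nil => simp [pvAccum]
  | cons y ys ih =>
    simp only [List.foldl_cons, pvAccum]
    by_cases hy : y ≥ 0
    · simp only [if_pos hy]
      have := ih (fs ++ [a]) y
      simpa using this
    · simp only [if_neg hy, List.getLast?_append, List.getLast?_singleton]
      have := ih (fs ++ [a]) a
      simpa using this

theorem pv_A_dw (states : List Int) : filter_states_py states = pvDW states := by
  induction states with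
  | nil => rfl
  | cons s rest ih =>
    by_cases hs : s ≥ 0
    · unfold filter_states_py pvDW
      simp only [List.foldl_cons, if_pos hs, List.dropWhile_cons]
      have hlt : ¬ (s < 0) := by omega
      simp only [hlt, decide_false]
      have := pv_fold_accum rest [] s
      simpa using this
    · unfold filter_states_py pvDW
      simp only [List.foldl_cons, if_neg hs, List.getLast?_nil, List.dropWhile_cons]
      have hlt : s < 0 := by omega
      simp only [hlt, decide_true]
      exact ih

-- pvKeep at a shifted start index is a shift of pvKeep at the base index.
theorem pv_keep_shift (xs : List Int) (i : Nat) :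
    pvKeep (i + 1) xs = (pvKeep i xs).map (· + 1) := by
  induction xs generalizing i with
  | nil => rfl
  | cons y ys ih =>
    unfold pvKeep
    by_cases hy : y ≥ 0
    · simp [hy, ih]
    · simp [hy, ih]

-- Expanding shifted indices over a cons list expands the original indices over the tail.
theorem pvExpand_cons (states : List Int) (i : Nat) (rest : List Nat) :
    pvExpand states (i :: rest)
      = List.replicate ((match rest with | [] => states.length | j :: _ => j) - i)
          (states.getD i 0) ++ pvExpand states rest := rfl

theorem pv_expand_shift (ks : List Nat) (s : Int) (states : List Int) :
    pvExpand (s :: states) (ks.map (· + 1)) = pvExpand states ks := by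
  induction ks with
  | nil => rfl
  | cons i rest ih =>
    rw [List.map_cons, pvExpand_cons, pvExpand_cons, ih, List.getD_cons_succ]
    cases rest with
    | nil => simp
    | cons j tl => simp [Nat.succ_sub_succ]

-- The first kept index (or the length, if none) is the length of the leading negative run.
theorem pv_keep_head (xs : List Int) :
    (match pvKeep 0 xs with | [] => xs.length | j :: _ => j)
      = (xs.takeWhile (fun s => decide (s < 0))).length := by
  induction xs with
  | nil => rfl
  | cons y ys ih =>
    unfold pvKeep
    by_cases hy : y ≥ 0
    · have : ¬ (y < 0) := by omega
      simp [hy, this]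
    · have hlt : y < 0 := by omega
      rw [if_neg hy, pv_keep_shift]
      simp only [List.takeWhile_cons, hlt, decide_true, List.length_cons]
      cases h : pvKeep 0 ys with
      | nil => simp [h] at ih ⊢; omega
      | cons k tl => simp [h] at ih ⊢; omega

-- Accumulation with seed a emits a over the leading negative run, then restarts.
theorem pv_accum_runs (xs : List Int) (a : Int) :
    pvAccum a xs
      = List.replicate (xs.takeWhile (fun s => decide (s < 0))).length a ++ pvDW xs := by
  induction xs generalizing a with
  | nil => rfl
  | cons y ys ih =>
    by_cases hy : y ≥ 0
    · have : ¬ (y < 0) := by omega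
      simp [pvAccum, pvDW, this, hy]
    · have hlt : y < 0 := by omega
      simp only [pvAccum]
      rw [if_neg hy, ih a]
      simp [pvDW, hlt, List.replicate_succ]

theorem pv_B_dw (states : List Int) : filter_states_py_alt states = pvDW states := by
  induction states with
  | nil => rfl
  | cons s rest ih =>
    unfold filter_states_py_alt at ih ⊢
    unfold pvKeep
    by_cases hs : s ≥ 0
    · have hnlt : ¬ (s < 0) := by omega
      rw [if_pos hs, pv_keep_shift]
      unfold pvExpand
      rw [pv_expand_shift, ih]
      simp only [List.getD_cons_zero]
      have hhead : (match (pvKeep 0 rest).map (· + 1) with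
          | [] => (s :: rest).length
          | j :: _ => j) = (rest.takeWhile (fun x => decide (x < 0))).length + 1 := by
        have := pv_keep_head rest
        cases h : pvKeep 0 rest with
        | nil => simp [h] at this ⊢; omega
        | cons k tl => simp [h] at this ⊢; omega
      rw [hhead]
      have hsub : (rest.takeWhile (fun x => decide (x < 0))).length + 1 - 0
          = (rest.takeWhile (fun x => decide (x < 0))).length + 1 := by omega
      rw [hsub, List.replicate_succ]
      show s :: (List.replicate _ s ++ pvDW rest) = pvDW (s :: rest)
      rw [← pv_accum_runs rest s]
      simp [pvDW, hnlt]
    · have hlt : s < 0 := by omega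
      rw [if_neg hs, pv_keep_shift, pv_expand_shift, ih]
      simp [pvDW, hlt]

-- ===== VERDICT (by name: the statement is the Claim_ definition above) =====
theorem filter_states_py_spec : Claim_equal_filter_states_py := by
  intro states _
  unfold Spec_filter_states_py
  rw [pv_A_dw, pv_B_dw]
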